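-- pv_equiv track=rewrite | github.com/NJManganelli/FourTopNAOD | RDF/FTPlotting.py | cartesianProductList
-- ===== SOURCE A (Python) =====
-- def cartesianProductList(name_format="$NUM_$LET_$SYM", name_tuples=[("$NUM", ["1", "2"]), ("$LET", ["A", "B", "C"]), ("$SYM", ["*", "@"])]):
--     """Take as input a string <name_format> and list of tuples <name_tuple> where a cartesian product of the tuples is formed.
--     The tuples contain a key-string (also present in the name_format string) and value-list with the replacements to cycle through.
--     The last tuple is the innermost replacement in the list formed, regardless of placement in the name_format string."""
--     if 'copy' not in dir():
--         try:
--             import copy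
--         except:
--             raise RuntimeError("Could not import the copy module in method cartesianProductList")
--     if 'itertools' not in dir():
--         try:
--             import itertools
--         except:
--             raise RuntimeError("Could not import the itertools module in method cartesianProductList")
--     list_of_lists = []
--     list_of_keys = []
--     for k, v in name_tuples:
--         list_of_lists.append(v)
--         list_of_keys.append(k)
--     cart_prod = [zip(list_of_keys, l) for l in list(itertools.product(*list_of_lists))]
--     ret_list = []
--     for uzip in cart_prod:
--         nc = copy.copy(name_format)
--         for k, v in uzip:
--             nc = nc.replace(k, v)
--         ret_list.append(nc)
--     return ret_list
-- ===== SOURCE B (Python) =====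
-- def cartesianProductList(name_format="$NUM_$LET_$SYM", name_tuples=[("$NUM", ["1", "2"]), ("$LET", ["A", "B", "C"]), ("$SYM", ["*", "@"])]):
--     def go(cur, pairs):
--         if not pairs:
--             return [cur]
--         (k, vs), rest = pairs[0], pairs[1:]
--         out = []
--         for v in vs:
--             out.extend(go(cur.replace(k, v), rest))
--         return out
--     return go(name_format, list(name_tuples))
-- ===== Notes on version B (the rewrite author's own statement) =====
-- stated objective: simpler
-- what changed: Replaced the itertools.product + zip + per-tuple replace loop with a direct recursion over the (key, value-list) pairs that substitutes and recurses, concatenating the results.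
import Mathlib
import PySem

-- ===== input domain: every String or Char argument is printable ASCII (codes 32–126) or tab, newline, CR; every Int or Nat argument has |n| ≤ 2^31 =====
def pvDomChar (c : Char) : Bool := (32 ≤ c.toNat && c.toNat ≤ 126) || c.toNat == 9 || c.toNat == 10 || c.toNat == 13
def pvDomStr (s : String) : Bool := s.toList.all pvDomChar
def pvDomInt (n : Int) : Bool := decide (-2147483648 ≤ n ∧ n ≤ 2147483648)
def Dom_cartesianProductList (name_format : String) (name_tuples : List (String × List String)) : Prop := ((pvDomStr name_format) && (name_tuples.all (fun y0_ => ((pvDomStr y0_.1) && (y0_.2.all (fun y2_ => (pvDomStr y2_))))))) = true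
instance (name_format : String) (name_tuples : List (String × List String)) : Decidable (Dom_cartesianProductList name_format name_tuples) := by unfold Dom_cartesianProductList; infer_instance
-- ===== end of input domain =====

-- ===== PORT A =====
-- B replaces itertools.product+zip+replace loop by a direct recursion over the (key, values) pairs; objective: simpler.
-- product of lists, rightmost varying fastest (itertools.product)
def pvProd : List (List String) → List (List String)
  | [] => [[]]
  | l :: ls => l.flatMap (fun v => (pvProd ls).map (fun t => v :: t))

def cartesianProductList (name_format : String) (name_tuples : List (String × List String)) : List String :=
  -- for k, v in name_tuples: list_of_lists.append(v); list_of_keys.append(k)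
  let st := name_tuples.foldl (fun (st : List (List String) × List String) kv => (st.1 ++ [kv.2], st.2 ++ [kv.1])) ([], [])
  let list_of_lists := st.1
  let list_of_keys := st.2
  -- cart_prod = [zip(list_of_keys, l) for l in itertools.product(*list_of_lists)]
  let cart_prod := (pvProd list_of_lists).map (fun l => list_of_keys.zip l)
  -- for uzip in cart_prod: nc = name_format; for k, v in uzip: nc = nc.replace(k, v); ret_list.append(nc)
  cart_prod.foldl (fun ret uzip =>
    ret ++ [uzip.foldl (fun nc kv => PySem.Str.replace nc kv.1 kv.2) name_format]) []

-- ===== PORT B =====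
def cartesianProductList_go (cur : String) : List (String × List String) → List String
  | [] => [cur]
  | (k, vs) :: rest => vs.flatMap (fun v => cartesianProductList_go (PySem.Str.replace cur k v) rest)

def cartesianProductList_alt (name_format : String) (name_tuples : List (String × List String)) : List String :=
  cartesianProductList_go name_format name_tuples

-- ===== PRECONDITION & SPEC =====
def Spec_cartesianProductList (name_format : String) (name_tuples : List (String × List String)) (out : List String) : Prop := out = cartesianProductList_alt name_format name_tuples
instance (name_format : String) (name_tuples : List (String × List String)) (out : List String) : Decidable (Spec_cartesianProductList name_format name_tuples out) := by unfold Spec_cartesianProductList; infer_instance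

-- ===== CLAIM (what is proved, stated in full; the proofs are below) =====
def Claim_equal_cartesianProductList : Prop := ∀ (name_format : String) (name_tuples : List (String × List String)), Dom_cartesianProductList name_format name_tuples → Spec_cartesianProductList name_format name_tuples (cartesianProductList name_format name_tuples)


-- ===== LEMMAS AND PROOFS =====

lemma pv_foldl_pairs (ts : List (String × List String)) (a : List (List String)) (b : List String) :
    ts.foldl (fun (st : List (List String) × List String) kv => (st.1 ++ [kv.2], st.2 ++ [kv.1])) (a, b)
      = (a ++ ts.map Prod.snd, b ++ ts.map Prod.fst) := by
  induction ts generalizing a b with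
  | nil => simp
  | cons kv rest ih => simp [List.foldl_cons, ih]

lemma pv_foldl_append_map {α β : Type} (xs : List α) (f : α → β) (acc : List β) :
    xs.foldl (fun ret x => ret ++ [f x]) acc = acc ++ xs.map f := by
  induction xs generalizing acc with
  | nil => simp
  | cons x xs ih => simp [List.foldl_cons, ih]

lemma pv_go_eq (ts : List (String × List String)) (cur : String) :
    cartesianProductList_go cur ts
      = (pvProd (ts.map Prod.snd)).map
          (fun l => ((ts.map Prod.fst).zip l).foldl (fun nc kv => PySem.Str.replace nc kv.1 kv.2) cur) := by
  induction ts generalizing cur with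
  | nil => simp [cartesianProductList_go, pvProd]
  | cons kv rest ih =>
    obtain ⟨k, vs⟩ := kv
    simp [cartesianProductList_go, pvProd, List.map_flatMap, ih, Function.comp_def,
      List.zip_cons_cons, List.foldl_cons]

theorem pv_main (name_format : String) (name_tuples : List (String × List String)) :
    cartesianProductList name_format name_tuples = cartesianProductList_alt name_format name_tuples := by
  simp only [cartesianProductList, cartesianProductList_alt, pv_foldl_pairs, pv_foldl_append_map,
    pv_go_eq, List.nil_append, List.map_map, Function.comp_def]

-- ===== VERDICT =====
theorem cartesianProductList_spec : Claim_equal_cartesianProductList := by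
  intro nf nt _
  unfold Spec_cartesianProductList
  exact pv_main nf nt
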